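-- pv_equiv track=rewrite | github.com/phil2strass/geo-api | scripts/generate_gb_local_authority_district_seed.py | resolve_qid
-- ===== SOURCE A (Python) =====
-- MANUAL_QID_OVERRIDES = {
--     # Wikidata is missing P836 on the current metropolitan borough item.
--     "E08000038": "Q1857382",  # Barnsley
--     # Wikidata is missing P836 on the current metropolitan borough item.
--     "E08000039": "Q12956644",  # Sheffield
--     # ONS uses the current Gaelic authority name; Wikidata's territorial item keeps the
--     # more common English label but still represents the council area.
--     "S12000013": "Q80967",  # Na h-Eileanan Siar / Outer Hebrides
-- }
--
-- def normalize_label(value: str) -> str: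
--     return value.casefold().replace("’", "'").replace("‘", "'").strip()
--
-- def resolve_qid(code: str, official_name: str, candidates: list[tuple[str, str]]) -> str:
--     manual_qid = MANUAL_QID_OVERRIDES.get(code)
--     if manual_qid is not None:
--         return manual_qid
--     if len(candidates) == 1:
--         return candidates[0][0]
--
--     normalized_name = normalize_label(official_name)
--     exact_non_council = [
--         candidate
--         for candidate in candidates
--         if normalize_label(candidate[1]) == normalized_name
--         and "council" not in normalize_label(candidate[1])
--     ]
--     if len(exact_non_council) == 1:
--         return exact_non_council[0][0]
--
--     exact = [candidate for candidate in candidates if normalize_label(candidate[1]) == normalized_name]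
--     if len(exact) == 1:
--         return exact[0][0]
--
--     non_council = [candidate for candidate in candidates if "council" not in normalize_label(candidate[1])]
--     if len(non_council) == 1:
--         return non_council[0][0]
--
--     raise RuntimeError(f"Could not resolve Wikidata item for {code} {official_name}: {candidates!r}")
-- ===== SOURCE B (Python) =====
-- MANUAL_QID_OVERRIDES = {
--     "E08000038": "Q1857382",  # Barnsley
--     "E08000039": "Q12956644",  # Sheffield
--     "S12000013": "Q80967",  # Na h-Eileanan Siar / Outer Hebrides
-- }
--
-- def normalize_label(value: str) -> str:
--     return value.casefold().replace("’", "'").replace("‘", "'").strip()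
--
-- def resolve_qid(code: str, official_name: str, candidates: list[tuple[str, str]]) -> str:
--     manual_qid = MANUAL_QID_OVERRIDES.get(code)
--     if manual_qid is not None:
--         return manual_qid
--     if len(candidates) == 1:
--         return candidates[0][0]
--
--     normalized_name = normalize_label(official_name)
--     # one classifying pass: per bucket keep (count, first matching qid)
--     n_enc = n_ex = n_nc = 0
--     q_enc = q_ex = q_nc = None
--     for qid, label in candidates:
--         norm = normalize_label(label)
--         is_exact = norm == normalized_name
--         is_nc = "council" not in norm
--         if is_exact and is_nc:
--             n_enc += 1
--             if q_enc is None: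
--                 q_enc = qid
--         if is_exact:
--             n_ex += 1
--             if q_ex is None:
--                 q_ex = qid
--         if is_nc:
--             n_nc += 1
--             if q_nc is None:
--                 q_nc = qid
--     if n_enc == 1:
--         return q_enc
--     if n_ex == 1:
--         return q_ex
--     if n_nc == 1:
--         return q_nc
--     raise RuntimeError(f"Could not resolve Wikidata item for {code} {official_name}: {candidates!r}")
-- ===== Notes on version B (the rewrite author's own statement) =====
-- stated objective: alternative
-- what changed: Replaces A's three full filtering passes (each re-normalizing every label, up to four normalize_label calls per candidate) with one classifying pass that normalizes each label once and maintains only a count and the first matching qid per bucket, followed by the same guard cascade.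
import Mathlib
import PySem

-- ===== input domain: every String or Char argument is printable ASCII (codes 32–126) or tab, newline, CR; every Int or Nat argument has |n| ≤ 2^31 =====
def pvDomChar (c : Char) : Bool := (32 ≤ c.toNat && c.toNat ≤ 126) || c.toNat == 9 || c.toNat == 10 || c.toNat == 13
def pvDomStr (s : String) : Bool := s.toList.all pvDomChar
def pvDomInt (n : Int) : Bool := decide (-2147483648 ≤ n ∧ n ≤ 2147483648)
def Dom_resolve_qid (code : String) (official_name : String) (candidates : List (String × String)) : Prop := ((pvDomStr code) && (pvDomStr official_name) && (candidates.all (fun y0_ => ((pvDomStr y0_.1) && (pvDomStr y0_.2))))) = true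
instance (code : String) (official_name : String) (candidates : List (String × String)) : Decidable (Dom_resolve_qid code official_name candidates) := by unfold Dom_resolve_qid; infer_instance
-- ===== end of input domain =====

-- B does ONE classifying pass keeping only a count and the first matching qid per bucket,
-- instead of A's three separate filtering passes that re-normalize every label.

-- shared same-module helpers (used by both ports, as in the Python module)
def MANUAL_QID_OVERRIDES : PySem.Dict String String :=
  PySem.Dict.ofList [("E08000038", "Q1857382"), ("E08000039", "Q12956644"), ("S12000013", "Q80967")]

-- casefold on the ASCII domain is lower; the curly-quote replacements are exact via PySem.Str.replace
def normalize_label (value : String) : String :=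
  PySem.Str.strip (PySem.Str.replace (PySem.Str.replace (PySem.Str.lower value) "’" "'") "‘" "'")

-- ===== PORT A =====
def resolve_qid (code : String) (official_name : String) (candidates : List (String × String)) : String :=
  match (MANUAL_QID_OVERRIDES.get? code) with
  | some manual_qid => manual_qid
  | none =>
    if candidates.length == 1 then (candidates.headD ("", "")).1
    else
      let normalized_name := normalize_label official_name
      let exact_non_council := candidates.filter (fun c =>
        normalize_label c.2 == normalized_name && !(PySem.Str.isIn "council" (normalize_label c.2)))
      if exact_non_council.length == 1 then (exact_non_council.headD ("", "")).1
      else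
        let exact := candidates.filter (fun c => normalize_label c.2 == normalized_name)
        if exact.length == 1 then (exact.headD ("", "")).1
        else
          let non_council := candidates.filter (fun c => !(PySem.Str.isIn "council" (normalize_label c.2)))
          if non_council.length == 1 then (non_council.headD ("", "")).1
          else ""  -- Python raises RuntimeError here; excluded by Pre_

-- ===== PORT B =====
-- bucket state: (count, first matching qid)
def pvBump (p : Nat × Option String) (cond : Bool) (qid : String) : Nat × Option String :=
  if cond then (p.1 + 1, if p.2.isNone then some qid else p.2) else p

def pvClassify (normalized_name : String) (candidates : List (String × String)) :
    (Nat × Option String) × (Nat × Option String) × (Nat × Option String) :=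
  candidates.foldl (fun s c =>
    let norm := normalize_label c.2
    let is_exact := norm == normalized_name
    let is_nc := !(PySem.Str.isIn "council" norm)
    (pvBump s.1 (is_exact && is_nc) c.1, pvBump s.2.1 is_exact c.1, pvBump s.2.2 is_nc c.1))
    ((0, none), (0, none), (0, none))

def resolve_qid_alt (code : String) (official_name : String) (candidates : List (String × String)) : String :=
  match (MANUAL_QID_OVERRIDES.get? code) with
  | some manual_qid => manual_qid
  | none =>
    if candidates.length == 1 then (candidates.headD ("", "")).1
    else
      let st := pvClassify (normalize_label official_name) candidates
      if st.1.1 == 1 then (st.1.2.getD "")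
      else if st.2.1.1 == 1 then (st.2.1.2.getD "")
      else if st.2.2.1 == 1 then (st.2.2.2.getD "")
      else ""  -- Python raises RuntimeError here; excluded by Pre_

-- ===== PRECONDITION & SPEC =====
-- Pre_ excludes exactly the inputs on which A raises RuntimeError (no override, not a single
-- candidate, and none of the three buckets has exactly one member).
def Pre_resolve_qid (code : String) (official_name : String) (candidates : List (String × String)) : Prop :=
  (MANUAL_QID_OVERRIDES.get? code).isSome = true ∨ candidates.length = 1 ∨
  (candidates.countP (fun c => normalize_label c.2 == normalize_label official_name
      && !(PySem.Str.isIn "council" (normalize_label c.2))) = 1) ∨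
  (candidates.countP (fun c => normalize_label c.2 == normalize_label official_name) = 1) ∨
  (candidates.countP (fun c => !(PySem.Str.isIn "council" (normalize_label c.2))) = 1)
instance (code : String) (official_name : String) (candidates : List (String × String)) : Decidable (Pre_resolve_qid code official_name candidates) := by unfold Pre_resolve_qid; infer_instance

def pvWitness_resolve_qid : String × String × (List (String × String)) :=
  ("X", "Foo", [("Q1", "Foo"), ("Q2", "Bar Council")])

def Spec_resolve_qid (code : String) (official_name : String) (candidates : List (String × String)) (out : String) : Prop := out = resolve_qid_alt code official_name candidates
instance (code : String) (official_name : String) (candidates : List (String × String)) (out : String) : Decidable (Spec_resolve_qid code official_name candidates out) := by unfold Spec_resolve_qid; infer_instance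

-- ===== CLAIM (what is proved, stated in full; the proofs are below) =====
def Claim_equal_resolve_qid : Prop := ∀ (code : String) (official_name : String) (candidates : List (String × String)), Dom_resolve_qid code official_name candidates → Pre_resolve_qid code official_name candidates → Spec_resolve_qid code official_name candidates (resolve_qid code official_name candidates)

-- ===== LEMMAS AND PROOFS =====

-- a single bucket of the fold computes (start + count of matches, first matching qid)
def pvComb (p : Nat × Option String) (pred : String × String → Bool) (l : List (String × String)) :
    Nat × Option String :=
  (p.1 + l.countP pred, p.2.or ((l.filter pred).head?.map Prod.fst))

theorem pvComb_cons (p : Nat × Option String) (pred : String × String → Bool)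
    (c : String × String) (l : List (String × String)) :
    pvComb p pred (c :: l) = pvComb (pvBump p (pred c) c.1) pred l := by
  symm
  simp only [pvBump, pvComb, List.countP_cons, List.filter_cons]
  by_cases h : pred c = true
  · simp only [h, if_true]
    cases hp : p.2 <;> simp [Option.or] <;> omega
  · simp only [Bool.not_eq_true] at h
    simp [h]

theorem pvClassify_spec (nn : String) (l : List (String × String)) (s) :
    l.foldl (fun s (c : String × String) =>
      let norm := normalize_label c.2
      let is_exact := norm == nn
      let is_nc := !(PySem.Str.isIn "council" norm)
      (pvBump s.1 (is_exact && is_nc) c.1, pvBump s.2.1 is_exact c.1, pvBump s.2.2 is_nc c.1)) s =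
    (pvComb s.1 (fun c => normalize_label c.2 == nn && !(PySem.Str.isIn "council" (normalize_label c.2))) l,
     pvComb s.2.1 (fun c => normalize_label c.2 == nn) l,
     pvComb s.2.2 (fun c => !(PySem.Str.isIn "council" (normalize_label c.2))) l) := by
  induction l generalizing s with
  | nil => simp [pvComb]
  | cons c t ih =>
    rw [List.foldl_cons, ih, pvComb_cons, pvComb_cons, pvComb_cons]

theorem pvHead_eq (l : List (String × String)) (p : String × String → Bool)
    (h : l.countP p = 1) :
    ((l.filter p).headD ("", "")).1 = ((l.filter p).head?.map Prod.fst).getD "" := by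
  rw [List.countP_eq_length_filter] at h
  cases hf : l.filter p with
  | nil => simp [hf] at h
  | cons a t => simp

theorem resolve_qid_spec : Claim_equal_resolve_qid := by
  intro code name cands _hDom hPre
  unfold Spec_resolve_qid resolve_qid resolve_qid_alt
  cases hov : MANUAL_QID_OVERRIDES.get? code with
  | some q => rfl
  | none =>
    by_cases hlen : cands.length == 1
    · simp [hlen]
    · simp only [hlen, if_false, Bool.false_eq_true]
      rw [pvClassify, pvClassify_spec]
      simp only [pvComb, Nat.zero_add, Option.none_or, ← List.countP_eq_length_filter, beq_iff_eq]
      set pENC := (fun c : String × String => normalize_label c.2 == normalize_label name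
        && !(PySem.Str.isIn "council" (normalize_label c.2)))
      set pEX := (fun c : String × String => normalize_label c.2 == normalize_label name)
      set pNC := (fun c : String × String => !(PySem.Str.isIn "council" (normalize_label c.2)))
      by_cases h1 : cands.countP pENC = 1
      · rw [if_pos h1, if_pos h1, pvHead_eq _ _ h1]
      · rw [if_neg h1, if_neg h1]
        by_cases h2 : cands.countP pEX = 1
        · rw [if_pos h2, if_pos h2, pvHead_eq _ _ h2]
        · rw [if_neg h2, if_neg h2]
          by_cases h3 : cands.countP pNC = 1
          · rw [if_pos h3, if_pos h3, pvHead_eq _ _ h3]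
          · -- A raises here; Pre_ excludes this case
            exfalso
            rcases hPre with h | h | h | h | h
            · rw [hov] at h; simp at h
            · exact hlen (by simp [h])
            · exact h1 h
            · exact h2 h
            · exact h3 h
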